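-- pv_equiv track=rewrite | github.com/JoseVictorDF/prog-python-ime | List 4/Ex4.1.py | encontrar_minimax
-- ===== SOURCE A (Python) =====
-- def encontrar_minimax(matriz):
--     maior = float('-inf')
--     linha_maior = 0
--     for i, linha in enumerate(matriz):
--         for valor in linha:
--             if valor > maior:
--                 maior = valor
--                 linha_maior = i
--
--     linha_alvo = matriz[linha_maior]
--     minimax = min(linha_alvo)
--     coluna_minimax = linha_alvo.index(minimax)
--
--     return minimax, (linha_maior, coluna_minimax)
-- ===== SOURCE B (Python) =====
-- def encontrar_minimax(matriz):
--     # Three-phase decomposition: global max of the flattened matrix,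
--     # then locate the first row containing it, then min/index in that row.
--     gmax = max(v for linha in matriz for v in linha)
--     linha_maior = next(i for i, linha in enumerate(matriz) if gmax in linha)
--     linha = matriz[linha_maior]
--     minimax = min(linha)
--     return minimax, (linha_maior, linha.index(minimax))
-- ===== Notes on version B (the rewrite author's own statement) =====
-- stated objective: idiomatic
-- what changed: A's single combined tracking loop (running max + row index) is replaced by a three-phase decomposition: max over the flattened matrix, then a search for the first row containing it, then min/index in that row.
import Mathlib
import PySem

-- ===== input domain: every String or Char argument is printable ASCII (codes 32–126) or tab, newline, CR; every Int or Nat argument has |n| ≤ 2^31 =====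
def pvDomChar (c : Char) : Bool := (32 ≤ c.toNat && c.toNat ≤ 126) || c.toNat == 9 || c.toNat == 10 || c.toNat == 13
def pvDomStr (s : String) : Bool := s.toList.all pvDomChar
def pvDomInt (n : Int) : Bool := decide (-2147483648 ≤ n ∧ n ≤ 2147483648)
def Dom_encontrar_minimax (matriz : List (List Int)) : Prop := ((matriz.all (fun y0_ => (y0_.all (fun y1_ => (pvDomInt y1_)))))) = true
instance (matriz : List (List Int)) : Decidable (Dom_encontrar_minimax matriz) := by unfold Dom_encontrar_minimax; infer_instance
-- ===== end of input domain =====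

-- B replaces A's single combined tracking loop (running max + its row index) by a
-- three-phase decomposition: global max over the flattened matrix, then the first
-- row containing it, then min/index inside that row (idiomatic, same cost).

-- ===== PORT A =====
-- 'valor > maior' where maior starts at float('-inf'): none plays -inf
def pvGtA (o : Option Int) (v : Int) : Bool := o.elim true (fun m => decide (m < v))

def encontrar_minimax (matriz : List (List Int)) : Int × (Int × Int) :=
  let st := (PySem.List.enumerate matriz).foldl
    (fun (s : Option Int × Int) (p : Int × List Int) =>
      p.2.foldl (fun (t : Option Int × Int) (v : Int) =>
        if pvGtA t.1 v then (some v, p.1) else t) s)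
    (none, 0)
  -- matriz[linha_maior]: IndexError on empty matriz — excluded by Pre_
  let linha_alvo := (PySem.List.pyGet? matriz st.2).getD []
  -- min(linha_alvo): ValueError on an empty target row — excluded by Pre_
  let minimax := (PySem.List.min? linha_alvo (fun x => x)).getD 0
  (minimax, (st.2, ((PySem.List.index? linha_alvo minimax).map Int.ofNat).getD 0))

-- ===== PORT B =====
def encontrar_minimax_alt (matriz : List (List Int)) : Int × (Int × Int) :=
  -- max(generator): ValueError when the flattened matrix is empty — excluded by Pre_
  let gmax := (PySem.List.max? (matriz.flatMap id) (fun y => y)).getD 0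
  -- next(i for i, linha in enumerate(matriz) if gmax in linha); StopIteration impossible under Pre_
  let linha_maior := (((PySem.List.enumerate matriz).find? (fun p => p.2.contains gmax)).map (·.1)).getD 0
  let linha := (PySem.List.pyGet? matriz linha_maior).getD []
  let minimax := (PySem.List.min? linha (fun x => x)).getD 0
  (minimax, (linha_maior, ((PySem.List.index? linha minimax).map Int.ofNat).getD 0))

-- ===== PRECONDITION & SPEC =====
-- A raises on a matrix with no nonempty row (IndexError on [], ValueError min([]) otherwise); excluded.
def Pre_encontrar_minimax (matriz : List (List Int)) : Prop := ∃ l ∈ matriz, l ≠ []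
instance (matriz : List (List Int)) : Decidable (Pre_encontrar_minimax matriz) := by
  unfold Pre_encontrar_minimax; infer_instance
def pvWitness_encontrar_minimax : List (List Int) := [[3, 1], [2]]

def Spec_encontrar_minimax (matriz : List (List Int)) (out : Int × (Int × Int)) : Prop := out = encontrar_minimax_alt matriz
instance (matriz : List (List Int)) (out : Int × (Int × Int)) : Decidable (Spec_encontrar_minimax matriz out) := by unfold Spec_encontrar_minimax; infer_instance

-- ===== CLAIM (what is proved, stated in full; the proofs are below) =====
def Claim_equal_encontrar_minimax : Prop := ∀ (matriz : List (List Int)), Dom_encontrar_minimax matriz → Pre_encontrar_minimax matriz → Spec_encontrar_minimax matriz (encontrar_minimax matriz)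

-- ===== LEMMAS AND PROOFS =====

-- head-recursive max of a list, the invariant value of A's running max
def pvMax : List Int → Option Int
  | [] => none
  | v :: rest => some (match pvMax rest with | none => v | some r => max v r)

-- summary of A's inner loop over one row
def pvStepR (s : Option Int × Int) (p : Int × List Int) : Option Int × Int :=
  match pvMax p.2 with
  | none => s
  | some r => if pvGtA s.1 r then (some r, p.1) else s

theorem pvMax_eq_none_iff (l : List Int) : pvMax l = none ↔ l = [] := by
  cases l <;> simp [pvMax]

theorem le_pvMax (l : List Int) (r : Int) (h : pvMax l = some r) : ∀ x ∈ l, x ≤ r := by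
  induction l generalizing r with
  | nil => simp
  | cons v rest ih =>
    simp only [pvMax] at h
    cases hr : pvMax rest with
    | none =>
      have hnil : rest = [] := (pvMax_eq_none_iff rest).mp hr
      subst hnil; rw [hr] at h; simp_all
    | some r' =>
      rw [hr] at h
      simp only [Option.some.injEq] at h
      intro x hx
      rcases List.mem_cons.mp hx with rfl | hx
      · exact h ▸ le_max_left x r'
      · exact le_trans (ih r' hr x hx) (h ▸ le_max_right v r')

theorem pvMax_mem (l : List Int) (r : Int) (h : pvMax l = some r) : r ∈ l := by
  induction l generalizing r with
  | nil => simp [pvMax] at h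
  | cons v rest ih =>
    simp only [pvMax] at h
    cases hr : pvMax rest with
    | none => rw [hr] at h; simp_all
    | some r' =>
      rw [hr] at h
      simp only [Option.some.injEq] at h
      rcases le_total v r' with hle | hle
      · have hrr : r = r' := by omega
        exact hrr ▸ List.mem_cons_of_mem v (ih r' hr)
      · have hrv : r = v := by omega
        subst hrv; exact List.mem_cons_self ..

theorem pvMax_append (xs ys : List Int) :
    pvMax (xs ++ ys) = match pvMax xs, pvMax ys with
      | none, o => o
      | some a, none => some a
      | some a, some b => some (max a b) := by
  induction xs with
  | nil => cases h : pvMax ys <;> simp [pvMax, h]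
  | cons v rest ih =>
    simp only [List.cons_append, pvMax, ih]
    cases pvMax rest <;> cases pvMax ys <;> simp [max_assoc]

-- A's inner loop computes pvStepR
theorem inner_eq (row : List Int) (i : Int) (s : Option Int × Int) :
    row.foldl (fun (t : Option Int × Int) (v : Int) =>
      if pvGtA t.1 v then (some v, i) else t) s = pvStepR s (i, row) := by
  induction row generalizing s with
  | nil => simp [pvStepR, pvMax]
  | cons v rest ih =>
    simp only [List.foldl_cons, ih, pvStepR, pvMax]
    rcases s with ⟨o, d⟩
    cases hr : pvMax rest with
    | none =>
      cases o <;> simp [pvGtA]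
    | some r' =>
      cases o with
      | none =>
        simp only [pvGtA, Option.elim, if_true]
        by_cases h1 : v < r' <;> simp [h1] <;> omega
      | some m =>
        simp only [pvGtA, Option.elim]
        by_cases h1 : m < v
        · simp only [h1, decide_true, if_true]
          by_cases h2 : v < r'
          · have : m < max v r' := by omega
            simp [h2, this]; omega
          · have hmax : max v r' = v := by omega
            simp [h2, hmax, h1]
        · simp only [h1, decide_false]
          by_cases h2 : m < r'
          · have : m < max v r' := by omega
            have hmax : max v r' = r' := by omega
            simp [h2, hmax]
          · have : ¬ m < max v r' := by omega
            simp [h2, this]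

-- with a running max already present
theorem foldR_some (rows : List (List Int)) : ∀ (j m d : Int),
    (PySem.List.enumerate rows j).foldl pvStepR (some m, d) =
      match pvMax rows.flatten with
      | none => (some m, d)
      | some g => if m < g then
          (some g, j + (rows.findIdx (fun row => row.contains g) : Int))
        else (some m, d) := by
  induction rows with
  | nil => intro j m d; simp [pvMax]
  | cons row rest ih =>
    intro j m d
    rw [PySem.List.enumerate_cons, List.foldl_cons]
    have hflat : (row :: rest).flatten = row ++ rest.flatten := by simp
    cases hr : pvMax row with
    | none =>
      have hrow : row = [] := (pvMax_eq_none_iff row).mp hr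
      subst hrow
      simp only [pvStepR, pvMax]
      rw [ih (j + 1) m d]
      simp only [List.flatten_cons, List.nil_append]
      cases hg : pvMax rest.flatten with
      | none => simp
      | some g =>
        by_cases hm : m < g
        · simp only [hm, if_true]
          rw [List.findIdx_cons]
          simp only [List.contains_nil, cond_false]
          congr 1
          push_cast; ring
        · simp [hm]
    | some r =>
      have hmem_r : r ∈ row := pvMax_mem row r hr
      by_cases hmr : m < r
      · have hstep : pvStepR (some m, d) (j, row) = (some r, j) := by
          simp [pvStepR, hr, pvGtA, hmr]
        rw [hstep, ih (j + 1) r j]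
        rw [List.flatten_cons, pvMax_append, hr]
        cases hg' : pvMax rest.flatten with
        | none =>
          simp [hmr, List.findIdx_cons, hmem_r]
        | some g' =>
          by_cases h2 : r < g'
          · have hmax : max r g' = g' := by omega
            have hnotmem : g' ∉ row := fun hm => absurd (le_pvMax row r hr g' hm) (by omega)
            have hmg' : m < g' := by omega
            simp [hmax, h2, hmg', List.findIdx_cons, hnotmem, Prod.ext_iff]; omega
          · have hmax : max r g' = r := by omega
            simp [hmax, hmr, h2, List.findIdx_cons, hmem_r]
      · have hstep : pvStepR (some m, d) (j, row) = (some m, d) := by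
          simp [pvStepR, hr, pvGtA, hmr]
        rw [hstep, ih (j + 1) m d]
        rw [List.flatten_cons, pvMax_append, hr]
        cases hg' : pvMax rest.flatten with
        | none =>
          simp [hmr]
        | some g' =>
          by_cases h2 : m < g'
          · have hrg : r < g' := by omega
            have hmax : max r g' = g' := by omega
            have hnotmem : g' ∉ row := fun hm => absurd (le_pvMax row r hr g' hm) (by omega)
            simp [hmax, h2, List.findIdx_cons, hnotmem, Prod.ext_iff]; omega
          · have hmax : ¬ m < max r g' := by omega
            simp [h2, hmax]

-- starting from -inf
theorem foldR_none (rows : List (List Int)) : ∀ (j : Int),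
    (PySem.List.enumerate rows j).foldl pvStepR (none, 0) =
      match pvMax rows.flatten with
      | none => (none, 0)
      | some g => (some g, j + (rows.findIdx (fun row => row.contains g) : Int)) := by
  induction rows with
  | nil => intro j; simp [pvMax]
  | cons row rest ih =>
    intro j
    rw [PySem.List.enumerate_cons, List.foldl_cons]
    cases hr : pvMax row with
    | none =>
      have hrow : row = [] := (pvMax_eq_none_iff row).mp hr
      subst hrow
      simp only [pvStepR, pvMax]
      rw [ih (j + 1)]
      simp only [List.flatten_cons, List.nil_append]
      cases hg : pvMax rest.flatten with
      | none => simp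
      | some g =>
        simp only [List.findIdx_cons, List.contains_nil, cond_false]
        congr 1
        push_cast; ring
    | some r =>
      have hmem_r : r ∈ row := pvMax_mem row r hr
      have hstep : pvStepR (none, 0) (j, row) = (some r, j) := by
        simp [pvStepR, hr, pvGtA]
      rw [hstep, foldR_some rest (j + 1) r j]
      rw [List.flatten_cons, pvMax_append, hr]
      cases hg' : pvMax rest.flatten with
      | none =>
        simp [List.findIdx_cons, hmem_r]
      | some g' =>
        by_cases h2 : r < g'
        · have hmax : max r g' = g' := by omega
          have hnotmem : g' ∉ row := fun hm => absurd (le_pvMax row r hr g' hm) (by omega)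
          simp [hmax, h2, List.findIdx_cons, hnotmem, Prod.ext_iff]; omega
        · have hmax : max r g' = r := by omega
          simp [hmax, h2, List.findIdx_cons, hmem_r]

-- B's next(...) search
theorem find_enum_eq (rows : List (List Int)) : ∀ (j : Int) (f : List Int → Bool),
    rows.any f = true →
    (((PySem.List.enumerate rows j).find? (fun p => f p.2)).map (·.1)).getD 0
      = j + (rows.findIdx f : Int) := by
  induction rows with
  | nil => simp
  | cons row rest ih =>
    intro j f hany
    rw [PySem.List.enumerate_cons, List.find?_cons, List.findIdx_cons]
    by_cases hf : f row
    · simp [hf]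
    · simp only [hf, cond_false]
      have hrest : rest.any f = true := by simp [List.any_cons, hf] at hany ⊢; tauto
      rw [ih (j + 1) f hrest]
      push_cast; ring

-- PySem's max(no key) is pvMax
theorem pymax_eq_pvMax (l : List Int) : PySem.List.max? l (fun y => y) = pvMax l := by
  cases l with
  | nil => rfl
  | cons x t =>
    rw [PySem.List.max?_id_cons]
    simp only [pvMax]
    congr 1
    induction t generalizing x with
    | nil => simp [pvMax]
    | cons v rest ih =>
      simp only [List.foldl_cons, pvMax, ih (max x v)]
      cases pvMax rest <;> simp [max_assoc]

-- ===== VERDICT (by name: the statement is the Claim_ definition above) =====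
theorem encontrar_minimax_spec : Claim_equal_encontrar_minimax := by
  intro matriz _hdom hpre
  unfold Spec_encontrar_minimax
  obtain ⟨l, hl, hlne⟩ := hpre
  -- the flattened matrix is nonempty
  have hflat : matriz.flatten ≠ [] := by
    intro h
    rcases List.exists_mem_of_ne_nil l hlne with ⟨x, hx⟩
    have : x ∈ matriz.flatten := List.mem_flatten.mpr ⟨l, hl, hx⟩
    simp [h] at this
  obtain ⟨g, hg⟩ : ∃ g, pvMax matriz.flatten = some g := by
    cases hmx : pvMax matriz.flatten with
    | none => exact absurd ((pvMax_eq_none_iff _).mp hmx) hflat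
    | some g => exact ⟨g, rfl⟩
  have hmem : g ∈ matriz.flatten := pvMax_mem _ _ hg
  obtain ⟨row0, hrow0, hgrow0⟩ := List.mem_flatten.mp hmem
  have hany : matriz.any (fun row => row.contains g) = true := by
    simp only [List.any_eq_true]
    exact ⟨row0, hrow0, by simpa using hgrow0⟩
  -- evaluate A's loop
  have hstep : (fun (s : Option Int × Int) (p : Int × List Int) =>
      p.2.foldl (fun (t : Option Int × Int) (v : Int) =>
        if pvGtA t.1 v then (some v, p.1) else t) s) = pvStepR := by
    funext s p
    rw [inner_eq p.2 p.1 s]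
  have hA : (PySem.List.enumerate matriz).foldl
      (fun (s : Option Int × Int) (p : Int × List Int) =>
        p.2.foldl (fun (t : Option Int × Int) (v : Int) =>
          if pvGtA t.1 v then (some v, p.1) else t) s) ((none : Option Int), (0 : Int))
      = (some g, 0 + (matriz.findIdx (fun row => row.contains g) : Int)) := by
    rw [hstep, foldR_none matriz 0, hg]
  -- evaluate B's two passes
  have hgmax : (PySem.List.max? (matriz.flatMap id) (fun y => y)).getD 0 = g := by
    rw [List.flatMap_id, pymax_eq_pvMax, hg]; rfl
  have hB : (((PySem.List.enumerate matriz).find? (fun p => p.2.contains g)).map (·.1)).getD 0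
      = 0 + (matriz.findIdx (fun row => row.contains g) : Int) :=
    find_enum_eq matriz 0 _ hany
  show encontrar_minimax matriz = encontrar_minimax_alt matriz
  simp only [encontrar_minimax, encontrar_minimax_alt, hgmax, hA, hB]
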